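-- pv_equiv track=rewrite | github.com/crap0101/laundry_basket | merge_sort_and_Injecretor.py | takes_f
-- ===== SOURCE A (Python) =====
-- import itertools
-- from typing import Callable, Collection, Iterable, Sequence
-- from typing import Any, Generic, TypeVar
--
-- def takes_f (seq: Sequence, n: int, fillvalue: Any = None) -> Iterable:
--     """Yields chunk of *exactly* `n` items a times from `seq`.
--     Use `fillvalue` as replacement for missing values."""
--     it = iter(seq)
--     while True:
--         p = list(itertools.islice(it, 0, n))
--         if not p:
--             return
--         if len(p) < n:
--             p.extend([fillvalue]*(n-len(p)))
--         yield p
-- ===== SOURCE B (Python) =====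
-- import itertools
--
-- def takes_f(seq, n, fillvalue=None):
--     # grouper idiom: n copies of one iterator fed to zip_longest
--     return (list(chunk) for chunk in
--             itertools.zip_longest(*[iter(seq)] * n, fillvalue=fillvalue))
-- ===== Notes on version B (the rewrite author's own statement) =====
-- stated objective: idiomatic
-- what changed: Replaced A's explicit while-loop with islice and a manual pad step by the standard grouper idiom: zip_longest over n copies of one iterator, each tuple wrapped in list.
import Mathlib
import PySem

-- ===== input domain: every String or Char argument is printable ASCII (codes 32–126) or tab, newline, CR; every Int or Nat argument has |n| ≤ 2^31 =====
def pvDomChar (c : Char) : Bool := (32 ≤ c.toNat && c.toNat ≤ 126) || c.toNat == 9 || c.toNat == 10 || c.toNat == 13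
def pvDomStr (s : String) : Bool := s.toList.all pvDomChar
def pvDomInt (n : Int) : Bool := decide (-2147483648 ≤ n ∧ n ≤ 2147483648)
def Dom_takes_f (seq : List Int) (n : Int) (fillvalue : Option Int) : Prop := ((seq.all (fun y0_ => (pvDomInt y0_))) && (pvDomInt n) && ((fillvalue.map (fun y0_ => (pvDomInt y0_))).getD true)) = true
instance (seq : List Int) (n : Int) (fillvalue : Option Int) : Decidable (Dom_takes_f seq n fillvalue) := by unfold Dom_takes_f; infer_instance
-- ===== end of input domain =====

-- B replaces A's explicit while/islice/pad loop by the idiomatic zip_longest grouper;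
-- equivalence of the RETURN value (both generators materialised as lists) for n ≥ 0.

-- ===== PORT A =====
-- A's while-loop: p = next n items (islice), stop on empty, pad short tail, yield.
-- (n.toNat is safe: Pre_takes_f restricts to 0 ≤ n; islice raises for n < 0.)
def takes_f_loop (seq : List Int) (N : Nat) (fillvalue : Option Int) : List (List (Option Int)) :=
  if _h : seq.take N = [] then []
  else ((seq.take N).map some ++ List.replicate (N - (seq.take N).length) fillvalue)
       :: takes_f_loop (seq.drop N) N fillvalue
termination_by seq.length
decreasing_by
  rw [List.take_eq_nil_iff, not_or] at _h
  have : 0 < seq.length := List.length_pos_iff.mpr _h.2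
  simp only [List.length_drop]
  omega

def takes_f (seq : List Int) (n : Int) (fillvalue : Option Int) : List (List (Option Int)) :=
  takes_f_loop seq n.toNat fillvalue

-- ===== PORT B =====
-- zip_longest(*[iter(seq)]*n, fillvalue=fv): for n ≤ 0 the argument list is empty and
-- nothing is yielded; otherwise it yields ceil(len/n) rows, row i holding
-- seq[i*n+j] for j < n, with fillvalue where the index runs off the end.
def takes_f_alt (seq : List Int) (n : Int) (fillvalue : Option Int) : List (List (Option Int)) :=
  if n ≤ 0 then []
  else
    let N := n.toNat
    (List.range ((seq.length + N - 1) / N)).map (fun i =>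
      (List.range N).map (fun j =>
        match seq[i * N + j]? with
        | some x => some x
        | none => fillvalue))

-- ===== PRECONDITION & SPEC =====
-- Pre_ excludes n < 0, on which A's islice(it, 0, n) raises ValueError.
def Pre_takes_f (seq : List Int) (n : Int) (fillvalue : Option Int) : Prop := 0 ≤ n
instance (seq : List Int) (n : Int) (fillvalue : Option Int) : Decidable (Pre_takes_f seq n fillvalue) := by unfold Pre_takes_f; infer_instance
def pvWitness_takes_f : List Int × Int × Option Int := ([1, 2, 3], 2, some 9)

def Spec_takes_f (seq : List Int) (n : Int) (fillvalue : Option Int) (out : List (List (Option Int))) : Prop := out = takes_f_alt seq n fillvalue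
instance (seq : List Int) (n : Int) (fillvalue : Option Int) (out : List (List (Option Int))) : Decidable (Spec_takes_f seq n fillvalue out) := by unfold Spec_takes_f; infer_instance

-- ===== CLAIM (what is proved, stated in full; the proofs are below) =====
def Claim_equal_takes_f : Prop := ∀ (seq : List Int) (n : Int) (fillvalue : Option Int), Dom_takes_f seq n fillvalue → Pre_takes_f seq n fillvalue → Spec_takes_f seq n fillvalue (takes_f seq n fillvalue)

-- ===== LEMMAS AND PROOFS =====

-- one row of B equals A's padded chunk
theorem row_eq (seq : List Int) (N : Nat) (fv : Option Int) :
    (List.range N).map (fun j =>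
      match seq[j]? with
      | some x => some x
      | none => fv)
    = (seq.take N).map some ++ List.replicate (N - seq.length) fv := by
  induction seq generalizing N with
  | nil => simp [List.map_const']
  | cons a t ih =>
    cases N with
    | zero => simp
    | succ M =>
      rw [List.range_succ_eq_map]
      simp only [List.map_cons, List.map_map, List.take_succ_cons, List.length_cons]
      have : ((List.range M).map (fun j => match (a :: t)[j + 1]? with
          | some x => some x | none => fv))
          = (List.range M).map (fun j => match t[j]? with
          | some x => some x | none => fv) := by
        apply List.map_congr_left; intro j _; simp
      simpa [Function.comp, Nat.succ_sub_succ] using congrArg (some a :: ·) (this.trans (ih M))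

theorem ceil_step (N len : Nat) (hN : 0 < N) (hlen : 0 < len) :
    (len + N - 1) / N = ((len - N) + N - 1) / N + 1 := by
  have h1 : len + N - 1 = (len - 1) + N := by omega
  rw [h1, Nat.add_div_right _ hN]
  rcases Nat.lt_or_ge len N with h | h
  · have h2 : len - N = 0 := by omega
    rw [h2]
    rw [Nat.div_eq_of_lt (by omega), Nat.div_eq_of_lt (by omega)]
  · have : (len - N) + N - 1 = len - 1 := by omega
    rw [this]

theorem loop_eq_rows (seq : List Int) (N : Nat) (fv : Option Int) (hN : 0 < N) :
    takes_f_loop seq N fv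
    = (List.range ((seq.length + N - 1) / N)).map (fun i =>
        (List.range N).map (fun j =>
          match seq[i * N + j]? with
          | some x => some x
          | none => fv)) := by
  by_cases hs : seq = []
  · subst hs
    rw [takes_f_loop]
    simp [Nat.div_eq_of_lt (show N - 1 < N by omega)]
  · have hlen : 0 < seq.length := List.length_pos_iff.mpr hs
    have hp : seq.take N ≠ [] := by
      simp only [ne_eq, List.take_eq_nil_iff]
      exact fun h => (h.resolve_left (by omega)) |> hs
    rw [takes_f_loop]
    simp only [hp, dif_neg, not_false_iff]
    have hdrop : (seq.drop N).length = seq.length - N := List.length_drop ..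
    have ih := loop_eq_rows (seq.drop N) N fv hN
    rw [ih, hdrop, ceil_step N seq.length hN hlen, List.range_succ_eq_map]
    simp only [List.map_cons, List.map_map]
    congr 1
    · -- head row
      simp only [Nat.zero_mul, Nat.zero_add, List.length_take]
      have hmin : N - min N seq.length = N - seq.length := by omega
      rw [hmin]
      exact (row_eq seq N fv).symm
    · -- tail rows
      apply List.map_congr_left; intro i _
      simp only [Function.comp]
      apply List.map_congr_left; intro j _
      have hidx : (i + 1) * N + j = N + (i * N + j) := by ring
      rw [List.getElem?_drop, hidx]
termination_by seq.length
decreasing_by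
  have : 0 < seq.length := List.length_pos_iff.mpr hs
  simp only [List.length_drop]; omega

-- ===== VERDICT (by name: the statement is the Claim_ definition above) =====
theorem takes_f_spec : Claim_equal_takes_f := by
  intro seq n fv _ hpre
  unfold Spec_takes_f takes_f takes_f_alt
  rcases lt_or_eq_of_le hpre with h | h
  · have hne : ¬ n ≤ 0 := by omega
    simp only [hne, if_false]
    exact loop_eq_rows seq n.toNat fv (by omega)
  · subst h
    rw [takes_f_loop]
    simp
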